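-- pv_equiv track=rewrite | github.com/PeterAugustinak/advent-of-code-2021 | src/day8.py | decode_clear_digits
-- ===== SOURCE A (Python) =====
-- def decode_clear_digits(line):
--     """Returns string for every clear digit (the digit with unice number of elements)"""
--     one = ''
--     seven = ''
--     four = ''
--     eight = ''
--
--     for digit in line:
--         real_digit = len(digit)
--         if not one:
--             if real_digit == 2:
--                 one = digit
--         if not seven:
--             if real_digit == 3:
--                 seven = digit
--         if not four:
--             if real_digit == 4:
--                 four = digit
--         if not eight:
--             if real_digit == 7:
--                 eight = digit
--
--     return [one, seven, four, eight]
-- ===== SOURCE B (Python) =====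
-- def decode_clear_digits(line):
--     """Returns string for every clear digit (the digit with unique number of elements)"""
--     return [next((d for d in line if len(d) == n), '') for n in (2, 3, 4, 7)]
-- ===== Notes on version B (the rewrite author's own statement) =====
-- stated objective: idiomatic
-- what changed: Replaces the single pass maintaining four found-flags with four independent first-match lookups (next with default '') for the target lengths 2,3,4,7; each scan short-circuits at its first hit instead of re-testing four flags on every element.
import Mathlib
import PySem

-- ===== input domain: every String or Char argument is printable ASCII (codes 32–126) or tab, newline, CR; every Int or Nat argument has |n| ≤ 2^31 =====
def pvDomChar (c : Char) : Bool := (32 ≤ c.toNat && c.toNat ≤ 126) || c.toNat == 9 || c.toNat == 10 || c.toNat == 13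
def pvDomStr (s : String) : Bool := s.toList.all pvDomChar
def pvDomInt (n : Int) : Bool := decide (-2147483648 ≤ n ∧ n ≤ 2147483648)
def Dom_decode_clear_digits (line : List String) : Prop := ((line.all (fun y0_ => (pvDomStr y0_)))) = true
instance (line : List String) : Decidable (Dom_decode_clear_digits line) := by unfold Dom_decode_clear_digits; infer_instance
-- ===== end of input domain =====

-- B replaces A's single flag-maintaining pass by four independent first-match lookups (idiomatic decomposition).

-- ===== PORT A =====
-- one pass over the line, keeping the state (one, seven, four, eight); each slot is
-- filled only while still empty, mirroring A's `if not one: if real_digit == 2: …` chain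
def decode_clear_digits (line : List String) : List String :=
  let st := line.foldl (fun (st : String × String × String × String) digit =>
    let real_digit := PySem.Str.len digit
    (if st.1 = "" then (if real_digit = 2 then digit else st.1) else st.1,
     if st.2.1 = "" then (if real_digit = 3 then digit else st.2.1) else st.2.1,
     if st.2.2.1 = "" then (if real_digit = 4 then digit else st.2.2.1) else st.2.2.1,
     if st.2.2.2 = "" then (if real_digit = 7 then digit else st.2.2.2) else st.2.2.2))
    ("", "", "", "")
  [st.1, st.2.1, st.2.2.1, st.2.2.2]

-- ===== PORT B =====
-- four independent first-match lookups: next((d for d in line if len(d) == n), '') for n in (2,3,4,7)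
def decode_clear_digits_alt (line : List String) : List String :=
  [(2 : Int), 3, 4, 7].map (fun n => (line.find? (fun d => PySem.Str.len d = n)).getD "")

-- ===== PRECONDITION & SPEC =====
def Spec_decode_clear_digits (line : List String) (out : List String) : Prop := out = decode_clear_digits_alt line
instance (line : List String) (out : List String) : Decidable (Spec_decode_clear_digits line out) := by unfold Spec_decode_clear_digits; infer_instance

-- ===== CLAIM (what is proved, stated in full; the proofs are below) =====
def Claim_equal_decode_clear_digits : Prop := ∀ (line : List String), Dom_decode_clear_digits line → Spec_decode_clear_digits line (decode_clear_digits line)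

-- ===== LEMMAS AND PROOFS =====

-- one slot of A's loop, in isolation
def pvG (n : Int) (acc digit : String) : String :=
  if acc = "" then (if PySem.Str.len digit = n then digit else acc) else acc

-- what B computes for one length
def pvFirst (line : List String) (n : Int) : String :=
  (line.find? (fun d => PySem.Str.len d = n)).getD ""

theorem pvKeep (line : List String) (n : Int) (s : String) (hs : s ≠ "") :
    line.foldl (pvG n) s = s := by
  induction line with
  | nil => rfl
  | cons d tl ih => simp [List.foldl_cons, pvG, hs, ih]

theorem pvSlot (line : List String) (n : Int) (hn : n ≠ 0) :
    line.foldl (pvG n) "" = pvFirst line n := by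
  induction line with
  | nil => rfl
  | cons d tl ih =>
    rw [List.foldl_cons]
    by_cases hd : PySem.Str.len d = n
    · have hd' : d ≠ "" := by
        intro h; rw [h] at hd
        exact hn (by simpa [PySem.Str.len] using hd.symm)
      rw [show pvG n "" d = d from by rw [pvG, if_pos rfl, if_pos hd], pvKeep tl n d hd']
      simp only [pvFirst, List.find?_cons]
      rw [decide_eq_true hd]
      rfl
    · rw [show pvG n "" d = "" from by rw [pvG, if_pos rfl, if_neg hd], ih]
      simp only [pvFirst, List.find?_cons]
      rw [decide_eq_false hd]

-- A's tuple fold splits into four independent slot folds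
theorem pvSplit (line : List String) (a b c d : String) :
    (line.foldl (fun (st : String × String × String × String) digit =>
      let real_digit := PySem.Str.len digit
      (if st.1 = "" then (if real_digit = 2 then digit else st.1) else st.1,
       if st.2.1 = "" then (if real_digit = 3 then digit else st.2.1) else st.2.1,
       if st.2.2.1 = "" then (if real_digit = 4 then digit else st.2.2.1) else st.2.2.1,
       if st.2.2.2 = "" then (if real_digit = 7 then digit else st.2.2.2) else st.2.2.2))
      (a, b, c, d))
    = (line.foldl (pvG 2) a, line.foldl (pvG 3) b, line.foldl (pvG 4) c, line.foldl (pvG 7) d) := by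
  induction line generalizing a b c d with
  | nil => rfl
  | cons x tl ih =>
    simp only [List.foldl_cons]
    rw [ih]
    rfl

-- ===== VERDICT (by name: the statement is the Claim_ definition above) =====
theorem decode_clear_digits_spec : Claim_equal_decode_clear_digits := by
  intro line _
  show decode_clear_digits line = decode_clear_digits_alt line
  unfold decode_clear_digits decode_clear_digits_alt
  rw [pvSplit]
  simp [pvSlot line 2 (by decide), pvSlot line 3 (by decide),
    pvSlot line 4 (by decide), pvSlot line 7 (by decide), pvFirst]
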